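-- pv_equiv track=rewrite | github.com/Zofia-Opolska/prg-basics | TEST3-MOCK-GR2/p2.py | f
-- ===== SOURCE A (Python) =====
-- def f(tekst):
--     count=0
--     for i in tekst:
--         if i == "+":
--             count+=1
--         elif i == "-":
--             count-=1
--     return count
-- ===== SOURCE B (Python) =====
-- def f(tekst):
--     return tekst.count("+") - tekst.count("-")
-- ===== Notes on version B (the rewrite author's own statement) =====
-- stated objective: idiomatic
-- what changed: Replaces the single manual loop with two branches and an accumulator by two str.count library scans whose difference is returned as one expression.
import Mathlib
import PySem

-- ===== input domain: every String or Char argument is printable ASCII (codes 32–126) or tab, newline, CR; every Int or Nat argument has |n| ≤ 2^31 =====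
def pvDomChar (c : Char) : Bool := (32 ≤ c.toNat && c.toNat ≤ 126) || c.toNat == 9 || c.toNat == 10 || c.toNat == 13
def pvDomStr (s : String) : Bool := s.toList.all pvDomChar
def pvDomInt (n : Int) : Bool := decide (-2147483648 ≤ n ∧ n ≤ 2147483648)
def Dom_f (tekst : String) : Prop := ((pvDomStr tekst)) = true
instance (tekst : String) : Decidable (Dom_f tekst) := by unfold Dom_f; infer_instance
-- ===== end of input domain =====

-- B replaces A's manual accumulate-in-a-loop by the difference of two str.count scans (idiomatic one-liner).

-- ===== PORT A =====
-- for i in tekst: if i == "+": count += 1 elif i == "-": count -= 1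
def f (tekst : String) : Int :=
  tekst.toList.foldl
    (fun count i => if i == '+' then count + 1 else if i == '-' then count - 1 else count) 0

-- ===== PORT B =====
-- return tekst.count("+") - tekst.count("-")
def f_alt (tekst : String) : Int :=
  (PySem.Str.count tekst "+" : Int) - (PySem.Str.count tekst "-" : Int)

-- ===== PRECONDITION & SPEC =====
def Spec_f (tekst : String) (out : Int) : Prop := out = f_alt tekst
instance (tekst : String) (out : Int) : Decidable (Spec_f tekst out) := by unfold Spec_f; infer_instance

-- ===== CLAIM (what is proved, stated in full; the proofs are below) =====
def Claim_equal_f : Prop := ∀ (tekst : String), Dom_f tekst → Spec_f tekst (f tekst)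

-- ===== LEMMAS AND PROOFS =====

-- Python's s.count(c) for a single character c is the plain character count.
theorem chars_count_go_singleton (c : Char) (l : List Char) (fuel acc : Nat)
    (h : l.length ≤ fuel) :
    PySem.Chars.count.go [c] fuel l acc = acc + l.count c := by
  induction l generalizing fuel acc with
  | nil => cases fuel <;> simp [PySem.Chars.count.go]
  | cons hd tl ih =>
    cases fuel with
    | zero => simp at h
    | succ n =>
      have hn : tl.length ≤ n := by simpa using h
      by_cases hc : c = hd
      · subst hc
        simp [PySem.Chars.count.go, List.isPrefixOf, ih _ _ hn]
        omega
      · have : ([c].isPrefixOf (hd :: tl)) = false := by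
          simp [List.isPrefixOf]
          exact hc
        simp [PySem.Chars.count.go, this, ih _ _ hn, List.count_cons]
        intro h'; exact absurd h'.symm hc

theorem chars_count_singleton (c : Char) (l : List Char) :
    PySem.Chars.count l [c] = l.count c := by
  simpa using chars_count_go_singleton c l l.length 0 (le_refl _)

theorem foldl_plus_minus (l : List Char) (a : Int) :
    l.foldl (fun count i => if i == '+' then count + 1 else if i == '-' then count - 1 else count) a
      = a + (l.count '+' : Int) - (l.count '-' : Int) := by
  induction l generalizing a with
  | nil => simp
  | cons hd tl ih =>
    simp only [List.foldl_cons, ih, List.count_cons]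
    by_cases h1 : hd = '+'
    · simp [h1]; omega
    · by_cases h2 : hd = '-'
      · simp [h2]; omega
      · simp [h1, h2]

-- ===== VERDICT (by name: the statement is the Claim_ definition above) =====
theorem f_spec : Claim_equal_f := by
  intro tekst _
  unfold Spec_f f f_alt
  rw [foldl_plus_minus]
  rw [PySem.Str.count_eq, PySem.Str.count_eq]
  simp [chars_count_singleton]
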